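-- pv_equiv track=rewrite | github.com/msaadsaeed/FOP | test.py | same_func
-- ===== SOURCE A (Python) =====
-- def same_func(f):
--     issame_lst = []
--     for idx in range(len(f)):
--         if idx % 2 == 0:
--             issame = True
--         else:
--             issame = False
--         issame_lst.append(issame)
--     return issame_lst
-- ===== SOURCE B (Python) =====
-- def same_func(f):
--     n = len(f)
--     return ([True, False] * ((n + 1) // 2))[:n]
-- ===== Notes on version B (the rewrite author's own statement) =====
-- stated objective: idiomatic
-- what changed: B tiles the 2-element pattern [True, False] (n+1)//2 times with list repetition and truncates to length n, instead of looping over every index and branching on its parity.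
import Mathlib
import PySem

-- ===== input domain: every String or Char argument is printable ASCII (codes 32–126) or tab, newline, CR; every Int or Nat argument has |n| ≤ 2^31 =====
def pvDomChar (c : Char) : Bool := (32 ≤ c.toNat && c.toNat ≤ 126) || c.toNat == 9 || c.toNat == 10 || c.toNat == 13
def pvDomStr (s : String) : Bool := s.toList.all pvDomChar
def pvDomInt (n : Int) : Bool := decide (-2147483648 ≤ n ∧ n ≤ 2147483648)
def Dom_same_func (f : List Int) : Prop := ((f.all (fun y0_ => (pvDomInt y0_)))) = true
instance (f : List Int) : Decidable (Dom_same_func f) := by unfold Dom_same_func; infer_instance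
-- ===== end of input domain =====

-- ===== PORT A =====
-- loop over idx in range(len(f)), appending True on even idx, False on odd idx
def same_func (f : List Int) : List Bool :=
  (List.range f.length).foldl
    (fun issame_lst idx =>
      issame_lst ++ [if idx % 2 = 0 then true else false]) []

-- ===== PORT B =====
-- n = len(f); ([True, False] * ((n + 1) // 2))[:n]
def same_func_alt (f : List Int) : List Bool :=
  ((List.replicate ((f.length + 1) / 2) [true, false]).flatten).take f.length

-- ===== PRECONDITION & SPEC =====
def Spec_same_func (f : List Int) (out : List Bool) : Prop := out = same_func_alt f
instance (f : List Int) (out : List Bool) : Decidable (Spec_same_func f out) := by unfold Spec_same_func; infer_instance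

-- ===== CLAIM (what is proved, stated in full; the proofs are below) =====
def Claim_equal_same_func : Prop := ∀ (f : List Int), Dom_same_func f → Spec_same_func f (same_func f)

-- ===== LEMMAS AND PROOFS =====

-- the tiled pattern of k copies is the parity map over range (2*k)
theorem flatten_replicate_pattern (k : Nat) :
    (List.replicate k [true, false]).flatten
      = (List.range (2 * k)).map (fun i => if i % 2 = 0 then true else false) := by
  induction k with
  | zero => simp
  | succ k ih =>
    rw [List.replicate_succ', List.flatten_append, ih]
    have h2 : 2 * (k + 1) = (2 * k + 1) + 1 := by ring
    rw [h2, List.range_succ, List.range_succ, List.map_append, List.map_append]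
    simp [Nat.mul_mod_right]

theorem same_func_as_map (f : List Int) :
    same_func f = (List.range f.length).map (fun i => if i % 2 = 0 then true else false) := by
  unfold same_func
  simpa using PySem.List.foldl_append_singleton_eq_map (fun i => if i % 2 = 0 then true else false) (List.range f.length) []

-- ===== VERDICT (by name: the statement is the Claim_ definition above) =====
theorem same_func_spec : Claim_equal_same_func := by
  intro f _
  unfold Spec_same_func same_func_alt
  rw [same_func_as_map, flatten_replicate_pattern]
  rw [← List.map_take, List.take_range, Nat.min_eq_left (by omega)]
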